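-- pv_equiv track=rewrite | github.com/ParkinsonLab/PopNet | ClusterPattern.py | interestingPairs
-- ===== SOURCE A (Python) =====
-- def interestingPairs(strains, line):
--     pairs = []
--     if len(line)<2:
--         return pairs
--
--     if line[0] in strains:
--         for element in line[1:]:
--             if element in strains:
--                 pairs.append(tuple(sorted((line[0], element))))
--
--     return pairs + interestingPairs(strains, line[1:])
-- ===== SOURCE B (Python) =====
-- def interestingPairs(strains, line):
--     s = set(strains)
--     hits = [e for e in line if e in s]
--     pairs = []
--     for i in range(len(hits)):
--         a = hits[i]
--         for b in hits[i + 1:]: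
--             pairs.append((a, b) if a <= b else (b, a))
--     return pairs
-- ===== Notes on version B (the rewrite author's own statement) =====
-- stated objective: faster
-- what changed: Replaced A's O(n^3) recursion on line[1:] (which re-scans strains with 'in' on a list and rebuilds result lists at every level) by one filtering pass using a set of strains followed by a single iterative double loop over the surviving elements.
import Mathlib
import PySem

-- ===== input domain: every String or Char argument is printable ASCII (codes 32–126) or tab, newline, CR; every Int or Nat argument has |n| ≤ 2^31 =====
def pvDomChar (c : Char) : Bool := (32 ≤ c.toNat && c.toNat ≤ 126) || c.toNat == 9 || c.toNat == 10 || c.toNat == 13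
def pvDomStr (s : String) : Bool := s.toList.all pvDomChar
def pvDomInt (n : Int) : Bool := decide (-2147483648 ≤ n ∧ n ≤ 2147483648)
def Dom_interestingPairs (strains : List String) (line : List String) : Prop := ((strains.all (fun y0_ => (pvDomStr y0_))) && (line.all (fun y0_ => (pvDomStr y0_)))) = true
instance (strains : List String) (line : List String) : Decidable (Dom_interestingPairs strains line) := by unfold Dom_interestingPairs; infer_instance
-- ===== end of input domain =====

-- ===== PORT A =====
-- B replaces A's O(n^3) recursion on line[1:] by one filter pass plus a double loop over the hits (objective: faster).
-- sortPair x e = tuple(sorted((x, e))) for two strings (Python's lexicographic order = Lean's String ≤)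
def sortPair (x e : String) : String × String := if x ≤ e then (x, e) else (e, x)

def interestingPairs (strains : List String) (line : List String) : List (String × String) :=
  match line with
  | [] => []            -- len(line) < 2
  | [_] => []           -- len(line) < 2
  | x :: y :: t =>
    let pairs :=
      if strains.contains x then
        (y :: t).foldl (fun acc e => if strains.contains e then acc ++ [sortPair x e] else acc) []
      else []
    pairs ++ interestingPairs strains (y :: t)

-- ===== PORT B =====
-- (a, b) if a <= b else (b, a)
def orderPair (a b : String) : String × String := if a ≤ b then (a, b) else (b, a)

-- inner loop: 'for b in hits[i+1:]: pairs.append(...)', outer loop walks hits front to back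
def altLoop (hits : List String) : List (String × String) :=
  match hits with
  | [] => []
  | a :: rest => rest.foldl (fun acc b => acc ++ [orderPair a b]) [] ++ altLoop rest

def interestingPairs_alt (strains : List String) (line : List String) : List (String × String) :=
  altLoop (line.filter (fun e => strains.contains e))

-- ===== PRECONDITION & SPEC =====
def Spec_interestingPairs (strains : List String) (line : List String) (out : List (String × String)) : Prop := out = interestingPairs_alt strains line
instance (strains : List String) (line : List String) (out : List (String × String)) : Decidable (Spec_interestingPairs strains line out) := by unfold Spec_interestingPairs; infer_instance

-- ===== CLAIM (what is proved, stated in full; the proofs are below) =====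
def Claim_equal_interestingPairs : Prop := ∀ (strains : List String) (line : List String), Dom_interestingPairs strains line → Spec_interestingPairs strains line (interestingPairs strains line)

-- ===== LEMMAS AND PROOFS =====
theorem foldl_app (f : String → String × String) :
    ∀ (l : List String) (acc : List (String × String)),
      l.foldl (fun acc b => acc ++ [f b]) acc = acc ++ l.map f := by
  intro l
  induction l with
  | nil => intro acc; simp
  | cons h t ih => intro acc; simp [List.foldl, ih]

theorem foldl_app_if (p : String → Bool) (f : String → String × String) :
    ∀ (l : List String) (acc : List (String × String)),
      l.foldl (fun acc e => if p e then acc ++ [f e] else acc) acc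
        = acc ++ (l.filter p).map f := by
  intro l
  induction l with
  | nil => intro acc; simp
  | cons h t ih =>
    intro acc
    by_cases hp : p h = true <;> simp [List.foldl, hp, ih]

theorem altLoop_cons (a : String) (rest : List String) :
    altLoop (a :: rest) = rest.map (orderPair a) ++ altLoop rest := by
  show rest.foldl (fun acc b => acc ++ [orderPair a b]) [] ++ altLoop rest = _
  rw [foldl_app]; simp

theorem sortPair_eq_orderPair : sortPair = orderPair := rfl

theorem main_eq (strains : List String) :
    ∀ line, interestingPairs strains line
      = altLoop (line.filter (fun e => strains.contains e)) := by
  intro line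
  induction line with
  | nil => simp [interestingPairs, altLoop]
  | cons x rest ih =>
    cases rest with
    | nil =>
      by_cases hx : x ∈ strains <;>
        simp [interestingPairs, altLoop, hx]
    | cons y t =>
      by_cases hx : x ∈ strains
      · have hfx : List.filter (fun e => strains.contains e) (x :: y :: t)
            = x :: List.filter (fun e => strains.contains e) (y :: t) := by
          simp [List.filter_cons, hx]
        simp only [interestingPairs, ih, foldl_app_if, hfx, altLoop_cons,
          sortPair_eq_orderPair]
        rw [if_pos (by simpa using hx)]
        simp only [List.nil_append]
      · simp only [interestingPairs, List.filter_cons, ih]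
        simp [hx]

-- ===== VERDICT (by name: the statement is the Claim_ definition above) =====
theorem interestingPairs_spec : Claim_equal_interestingPairs := by
  intro strains line _
  unfold Spec_interestingPairs interestingPairs_alt
  exact main_eq strains line
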